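-- pv_equiv track=rewrite | github.com/hwakabh/codewars | python/7/NoMusical/no_musical.py | no_musical
-- ===== SOURCE A (Python) =====
-- def no_musical(start_class, end_class, musical_performed_every, enrolment_duration):
--     if musical_performed_every == 0:
--         return end_class - start_class + 1
--     else:
--         if start_class == end_class:
--             return 0
--         c = 0
--         musicals = range(start_class, end_class + 1, musical_performed_every)
--         for i in range(start_class, end_class):
--             view = [y for y in range(i, i+enrolment_duration) if y in musicals]
--             if len(view) == 0:
--                 c += 1
--         return c
-- ===== SOURCE B (Python) =====
-- def no_musical(start_class, end_class, musical_performed_every, enrolment_duration):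
--     if musical_performed_every == 0:
--         return end_class - start_class + 1
--     if end_class <= start_class:
--         return 0
--     m = musical_performed_every
--     d = enrolment_duration
--     covered = 0
--     # Count covered class years by attributing to each musical year mu the
--     # years it is the earliest musical for: [max(mu-d+1, mu-m+1, start), mu],
--     # clipped to the class range [start, end-1]. These intervals are disjoint,
--     # so summing their lengths counts every covered year exactly once.
--     for mu in range(start_class, end_class + 1, m):
--         left = max(mu - d + 1, mu - m + 1, start_class)
--         right = min(mu, end_class - 1)
--         if left <= right:
--             covered += right - left + 1
--     return (end_class - start_class) - covered
-- ===== Notes on version B (the rewrite author's own statement) =====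
-- stated objective: alternative
-- what changed: B iterates over the musical years instead of the class years: each musical is attributed the disjoint interval of class years it is the earliest musical for, the interval lengths are summed and subtracted from the number of class years, replacing A's per-year scan of the whole enrolment window.
import Mathlib
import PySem

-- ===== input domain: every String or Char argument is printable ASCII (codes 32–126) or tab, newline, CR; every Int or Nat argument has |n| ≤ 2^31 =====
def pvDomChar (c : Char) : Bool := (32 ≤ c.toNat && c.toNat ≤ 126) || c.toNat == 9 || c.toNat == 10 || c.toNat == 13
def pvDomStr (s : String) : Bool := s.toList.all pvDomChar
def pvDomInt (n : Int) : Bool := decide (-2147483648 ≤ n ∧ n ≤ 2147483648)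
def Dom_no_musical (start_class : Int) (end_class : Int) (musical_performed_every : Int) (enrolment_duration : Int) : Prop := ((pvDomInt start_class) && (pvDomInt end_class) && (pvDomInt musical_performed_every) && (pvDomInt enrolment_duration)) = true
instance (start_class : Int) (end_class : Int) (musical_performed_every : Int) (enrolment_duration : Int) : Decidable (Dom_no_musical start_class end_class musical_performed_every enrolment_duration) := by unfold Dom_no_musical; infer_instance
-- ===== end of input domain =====

-- B replaces A's per-year scan of the enrolment window by a single pass over the
-- musical years, summing disjoint covered intervals and subtracting (alternative algorithm).


-- ===== PORT A =====
-- literal transliteration of A: for each class year i, build the list of musical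
-- years falling in [i, i+duration) and count the i's where that list is empty
def no_musical (start_class : Int) (end_class : Int) (musical_performed_every : Int) (enrolment_duration : Int) : Int :=
  if musical_performed_every = 0 then
    end_class - start_class + 1
  else if start_class = end_class then
    0
  else
    let musicals := PySem.List.pyRange start_class (end_class + 1) musical_performed_every
    (PySem.List.pyRange start_class end_class 1).foldl
      (fun c i =>
        let view := (PySem.List.pyRange i (i + enrolment_duration) 1).filter
          (fun y => decide (y ∈ musicals))
        if view.length = 0 then c + 1 else c) 0

-- ===== PORT B =====
-- transliteration of B: walk the musical years once; each musical mu exclusively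
-- covers the class years [max(mu-d+1, mu-m+1, start), min(mu, end-1)]; sum the
-- lengths of these disjoint intervals and subtract from the number of class years
def no_musical_alt (start_class : Int) (end_class : Int) (musical_performed_every : Int) (enrolment_duration : Int) : Int :=
  if musical_performed_every = 0 then
    end_class - start_class + 1
  else if end_class ≤ start_class then
    0
  else
    let covered := (PySem.List.pyRange start_class (end_class + 1) musical_performed_every).foldl
      (fun c mu =>
        let left := max (max (mu - enrolment_duration + 1) (mu - musical_performed_every + 1)) start_class
        let right := min mu (end_class - 1)
        if left ≤ right then c + (right - left + 1) else c) 0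
    (end_class - start_class) - covered

-- ===== PRECONDITION & SPEC =====
def Spec_no_musical (start_class : Int) (end_class : Int) (musical_performed_every : Int) (enrolment_duration : Int) (out : Int) : Prop := out = no_musical_alt start_class end_class musical_performed_every enrolment_duration
instance (start_class : Int) (end_class : Int) (musical_performed_every : Int) (enrolment_duration : Int) (out : Int) : Decidable (Spec_no_musical start_class end_class musical_performed_every enrolment_duration out) := by unfold Spec_no_musical; infer_instance

-- ===== CLAIM (what is proved, stated in full; the proofs are below) =====
def Claim_equal_no_musical : Prop := ∀ (start_class : Int) (end_class : Int) (musical_performed_every : Int) (enrolment_duration : Int), Dom_no_musical start_class end_class musical_performed_every enrolment_duration → Spec_no_musical start_class end_class musical_performed_every enrolment_duration (no_musical start_class end_class musical_performed_every enrolment_duration)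

-- ===== LEMMAS AND PROOFS =====

-- i is covered iff some musical year of M falls in i's enrolment window [i, i+d)
def pvCov (M : List Int) (d : Int) (i : Int) : Bool :=
  M.any (fun mu => decide (i ≤ mu) && decide (mu < i + d))

-- the interval length B adds for the musical mu
def pvTerm (s e m d : Int) (mu : Int) : Int :=
  if max (max (mu - d + 1) (mu - m + 1)) s ≤ min mu (e - 1)
  then min mu (e - 1) - max (max (mu - d + 1) (mu - m + 1)) s + 1 else 0

-- positive-step range is empty when the start is past the stop
lemma pyRange_nil_of_pos (a b m : Int) (hm : 0 < m) (h : b ≤ a) :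
    PySem.List.pyRange a b m = [] := by
  rw [PySem.List.pyRange_of_pos a b hm]
  simp [show ¬ a < b by omega]

-- positive-step range peels its first element
lemma pyRange_cons_of_pos (a b m : Int) (hm : 0 < m) (hab : a < b) :
    PySem.List.pyRange a b m = a :: PySem.List.pyRange (a + m) b m := by
  rw [PySem.List.pyRange_of_pos a b hm, PySem.List.pyRange_of_pos (a + m) b hm]
  have hx0 : 0 ≤ b - a - 1 := by omega
  have hdiv : (b - a + m - 1) / m = (b - a - 1) / m + 1 := by
    have h1 : b - a + m - 1 = b - a - 1 + 1 * m := by ring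
    rw [h1, Int.add_mul_ediv_right _ _ (show m ≠ 0 by omega)]
  by_cases h2 : a + m < b
  · have hq0 : 0 ≤ (b - a - 1) / m := Int.ediv_nonneg hx0 hm.le
    have hn : ((b - a + m - 1) / m).toNat = ((b - (a + m) + m - 1) / m).toNat + 1 := by
      have : b - (a + m) + m - 1 = b - a - 1 := by ring
      rw [this, hdiv]; omega
    simp only [show a < b from hab, if_pos, h2, if_pos, hn]
    rw [List.range_succ_eq_map]
    simp only [List.map_cons, List.map_map, Nat.cast_zero, mul_zero, add_zero]
    congr 1
    apply List.map_congr_left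
    intro k _
    simp only [Function.comp_apply, Nat.succ_eq_add_one]
    push_cast
    ring
  · have hq0 : (b - a - 1) / m = 0 :=
      Int.ediv_eq_zero_of_lt hx0 (by omega)
    have hn : ((b - a + m - 1) / m).toNat = 1 := by rw [hdiv, hq0]; rfl
    simp [show a < b from hab, show ¬ a + m < b from h2, hn, List.range_succ]
-- count of the i in [a, b) with c ≤ i
lemma countP_ge (c : Int) : ∀ (n : Nat) (a b : Int), (b - a).toNat ≤ n →
    ((PySem.List.pyRange a b 1).countP (fun i => decide (c ≤ i)) : Int) =
      max 0 (b - max a c) := by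
  intro n
  induction n with
  | zero =>
    intro a b h
    rw [PySem.List.pyRange_one_eq_nil (by omega)]
    simp; omega
  | succ n ih =>
    intro a b h
    by_cases hab : b ≤ a
    · rw [PySem.List.pyRange_one_eq_nil hab]
      simp; omega
    · have hb : b = (b - 1) + 1 := by ring
      rw [hb, PySem.List.pyRange_one_succ_right (show a ≤ b - 1 by omega)]
      rw [List.countP_append]
      have := ih a (b - 1) (by omega)
      push_cast
      simp only [List.countP_cons, List.countP_nil]
      by_cases hc : c ≤ b - 1 <;> simp [hc] <;> omega

-- the sum B accumulates over the musicals from mu on equals the number of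
-- covered class years in [max(mu-m+1, s), e)
lemma covSum (s e m d : Int) (hm : 0 < m) :
    ∀ (n : Nat) (mu : Int), (e + 1 - mu).toNat ≤ n → s ≤ mu →
    ((PySem.List.pyRange mu (e + 1) m).map (pvTerm s e m d)).sum =
      ((PySem.List.pyRange (max (mu - m + 1) s) e 1).countP
        (pvCov (PySem.List.pyRange mu (e + 1) m) d) : Int) := by
  intro n
  induction n with
  | zero =>
    intro mu h hs
    rw [pyRange_nil_of_pos mu (e + 1) m hm (by omega)]
    have hz : (PySem.List.pyRange (max (mu - m + 1) s) e 1).countP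
        (pvCov ([] : List Int) d) = 0 :=
      List.countP_eq_zero.mpr (fun x _ => by simp [pvCov])
    simp [hz]
  | succ n ih =>
    intro mu h hs
    by_cases hend : e + 1 ≤ mu
    · rw [pyRange_nil_of_pos mu (e + 1) m hm hend]
      have hz : (PySem.List.pyRange (max (mu - m + 1) s) e 1).countP
          (pvCov ([] : List Int) d) = 0 :=
        List.countP_eq_zero.mpr (fun x _ => by simp [pvCov])
      simp [hz]
    · -- mu ≤ e: peel the first musical
      have hmu_e : mu ≤ e := by omega
      rw [pyRange_cons_of_pos mu (e + 1) m hm (by omega)]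
      set M' := PySem.List.pyRange (mu + m) (e + 1) m with hM'
      set a := max (mu - m + 1) s with ha
      set t0 := min (mu + 1) e with ht0
      -- split the class years at t0
      have hsplit : PySem.List.pyRange a e 1 =
          PySem.List.pyRange a t0 1 ++ PySem.List.pyRange t0 e 1 :=
        PySem.List.pyRange_one_append a t0 e (by omega) (by omega)
      rw [hsplit, List.countP_append]
      -- chunk 1: years ≤ mu; covered iff mu - d + 1 ≤ i
      have hMmem : ∀ x ∈ M', mu + m ≤ x := by
        intro x hx
        rw [hM', PySem.List.mem_pyRange_iff_of_pos hm] at hx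
        exact hx.1
      have hc1 : (PySem.List.pyRange a t0 1).countP
          (pvCov (mu :: M') d) =
          (PySem.List.pyRange a t0 1).countP (fun i => decide (mu - d + 1 ≤ i)) := by
        apply List.countP_congr
        intro i hi
        rw [PySem.List.mem_pyRange_one] at hi
        have hi_mu : i ≤ mu := by omega
        simp only [pvCov, List.any_cons, Bool.or_eq_true, List.any_eq_true,
          Bool.and_eq_true, decide_eq_true_eq]
        constructor
        · rintro (⟨h1, h2⟩ | ⟨x, hx, h1, h2⟩)
          · omega
          · have := hMmem x hx; omega
        · intro hcd
          left; omega
      -- chunk 2: years > mu; the head musical is irrelevant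
      have hc2 : (PySem.List.pyRange t0 e 1).countP (pvCov (mu :: M') d) =
          (PySem.List.pyRange t0 e 1).countP (pvCov M' d) := by
        apply List.countP_congr
        intro i hi
        rw [PySem.List.mem_pyRange_one] at hi
        have hi_mu : mu < i := by omega
        simp only [pvCov, List.any_cons, Bool.or_eq_true, Bool.and_eq_true,
          decide_eq_true_eq]
        constructor
        · rintro (⟨h1, h2⟩ | hh)
          · omega
          · exact hh
        · intro hh; right; exact hh
      -- IH on the tail
      have hih := ih (mu + m) (by omega) (by omega)
      have hrange : PySem.List.pyRange (max (mu + m - m + 1) s) e 1 =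
          PySem.List.pyRange t0 e 1 := by
        have hmax : max (mu + m - m + 1) s = mu + 1 := by omega
        rw [hmax, ht0]
        by_cases hlt : mu + 1 ≤ e
        · rw [min_eq_left hlt]
        · rw [PySem.List.pyRange_one_eq_nil (by omega),
            PySem.List.pyRange_one_eq_nil (by omega)]
      rw [hrange] at hih
      -- chunk 1 count in closed form
      have hcnt := countP_ge (mu - d + 1) (t0 - a).toNat a t0 (le_refl _)
      -- assemble
      rw [List.map_cons, List.sum_cons, hc1, hc2, ← hM'] at *
      have hterm : pvTerm s e m d mu = max 0 (t0 - max a (mu - d + 1)) := by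
        rw [pvTerm]
        split_ifs with hif <;> omega
      push_cast
      rw [hih] at *
      omega

-- A's loop counts the class years whose enrolment window misses every musical
lemma A_fold_eq (s e m d : Int) :
    (PySem.List.pyRange s e 1).foldl
      (fun c i =>
        if ((PySem.List.pyRange i (i + d) 1).filter
            (fun y => decide (y ∈ PySem.List.pyRange s (e + 1) m))).length = 0
        then c + 1 else c) 0 =
    ((PySem.List.pyRange s e 1).countP
      (fun i => ! pvCov (PySem.List.pyRange s (e + 1) m) d i) : Int) := by
  rw [PySem.List.foldl_congr_mem' _ _
    (fun c i => if (! pvCov (PySem.List.pyRange s (e + 1) m) d i) = true then c + 1 else c) _ ?_]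
  · rw [PySem.List.foldl_if_add_one]
    simp
  · intro i _ c
    have hiff : ((PySem.List.pyRange i (i + d) 1).filter
        (fun y => decide (y ∈ PySem.List.pyRange s (e + 1) m))).length = 0 ↔
        (! pvCov (PySem.List.pyRange s (e + 1) m) d i) = true := by
      simp only [List.length_eq_zero_iff, List.filter_eq_nil_iff, decide_eq_true_eq,
        Bool.not_eq_true', pvCov, List.any_eq_false, Bool.and_eq_true,
        PySem.List.mem_pyRange_one, decide_eq_true_eq, not_and]
      constructor
      · intro hall mu hmu hle
        by_contra hlt
        exact hall mu ⟨hle, by omega⟩ hmu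
      · intro hall y hy hmem
        exact hall y hmem (by omega) (by omega)
    exact if_congr hiff rfl rfl

-- ===== VERDICT =====
theorem no_musical_spec : Claim_equal_no_musical := by
  intro s e m d _
  unfold Spec_no_musical no_musical no_musical_alt
  by_cases hm0 : m = 0
  · simp [hm0]
  · by_cases hse : s = e
    · simp [hm0, hse]
    · simp only [hm0, if_false]
      by_cases hes : e ≤ s
      · -- no class years at all: A's loop range is empty
        rw [PySem.List.pyRange_one_eq_nil (by omega)]
        simp [hse, hes]
      · -- s < e
        simp only [hse, hes, if_false]
        have hslt : s < e := by omega
        -- B's fold is the sum of the interval lengths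
        have hB : (PySem.List.pyRange s (e + 1) m).foldl
            (fun c mu =>
              let left := max (max (mu - d + 1) (mu - m + 1)) s
              let right := min mu (e - 1)
              if left ≤ right then c + (right - left + 1) else c) 0 =
            ((PySem.List.pyRange s (e + 1) m).map (pvTerm s e m d)).sum := by
          rw [PySem.List.foldl_congr_mem' _ _
            (fun c mu => c + pvTerm s e m d mu) _ ?_]
          · rw [PySem.List.foldl_add]; simp
          · intro mu _ c
            simp only [pvTerm]
            split_ifs <;> omega
        rw [A_fold_eq, hB]
        by_cases hmp : 0 < m
        · -- positive step: the interval sum counts the covered years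
          have hcov := covSum s e m d hmp (e + 1 - s).toNat s (le_refl _) (le_refl s)
          have hmax : max (s - m + 1) s = s := by omega
          rw [hmax] at hcov
          rw [hcov]
          have hlen := List.length_eq_countP_add_countP
            (pvCov (PySem.List.pyRange s (e + 1) m) d)
            (l := PySem.List.pyRange s e 1)
          rw [PySem.List.length_pyRange_one] at hlen
          have hcompl : (PySem.List.pyRange s e 1).countP
              (fun i => ! pvCov (PySem.List.pyRange s (e + 1) m) d i) =
              (PySem.List.pyRange s e 1).countP
              (fun a => decide ¬ pvCov (PySem.List.pyRange s (e + 1) m) d a = true) := by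
            apply List.countP_congr; intro x _; simp
          rw [hcompl]
          have htn : ((e - s).toNat : Int) = e - s := by omega
          omega
        · -- negative step: there are no musicals at all
          have hmn : m < 0 := by omega
          have hMnil : PySem.List.pyRange s (e + 1) m = [] := by
            rw [List.eq_nil_iff_forall_not_mem]
            intro x hx
            rw [PySem.List.mem_pyRange_iff_of_neg hmn] at hx
            omega
          rw [hMnil]
          simp only [List.map_nil, List.sum_nil]
          have hall : (PySem.List.pyRange s e 1).countP
              (fun i => ! pvCov ([] : List Int) d i) =
              (PySem.List.pyRange s e 1).length :=
            List.countP_eq_length.mpr (fun x _ => by simp [pvCov])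
          rw [hall, PySem.List.length_pyRange_one]
          omega
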